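-- pv_equiv track=rewrite | github.com/LBJLincoln/nomos-nba-agent | features/engine.py | _consecutive_home
-- ===== SOURCE A (Python) =====
-- def _consecutive_home(records):
--     """Count current consecutive home games (from most recent)."""
--     count = 0
--     for r in reversed(records):
--         if r[4].get("is_home", False):
--             count += 1
--         else:
--             break
--     return count
-- ===== SOURCE B (Python) =====
-- def _consecutive_home(records):
--     """Count current consecutive home games (from most recent).
--
--     Forward single pass with reset-on-miss instead of reverse-iterate-and-break:
--     count is incremented on a home game and reset to 0 otherwise, so at the end
--     it holds the length of the trailing run of home games."""
--     count = 0
--     for r in records: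
--         count = count + 1 if r[4].get("is_home", False) else 0
--     return count
-- ===== Notes on version B (the rewrite author's own statement) =====
-- stated objective: alternative
-- what changed: Replaces the reverse-iterate-and-break scan with a forward single pass that resets a counter on every non-home record, so the trailing home run length falls out at the end without reversing or breaking.
-- outside the precondition, e.g. on _consecutive_home([[{}], [{}, {}, {}, {}, {}]]): A returns 0, B raises IndexError
import Mathlib
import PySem

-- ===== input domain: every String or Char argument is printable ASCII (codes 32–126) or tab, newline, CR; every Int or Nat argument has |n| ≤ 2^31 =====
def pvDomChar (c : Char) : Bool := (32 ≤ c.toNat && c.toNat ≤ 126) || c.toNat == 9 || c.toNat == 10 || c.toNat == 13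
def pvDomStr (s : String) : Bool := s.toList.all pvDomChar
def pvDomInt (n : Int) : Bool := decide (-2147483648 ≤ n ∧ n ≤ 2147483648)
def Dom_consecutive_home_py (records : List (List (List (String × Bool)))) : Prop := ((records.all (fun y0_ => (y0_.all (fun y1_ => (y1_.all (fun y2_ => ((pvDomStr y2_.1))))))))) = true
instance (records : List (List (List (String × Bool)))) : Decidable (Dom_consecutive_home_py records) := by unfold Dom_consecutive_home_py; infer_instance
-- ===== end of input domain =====

-- B replaces A's reverse-iterate-and-break scan by a forward single pass that resets a
-- counter on every non-home record (objective: alternative decomposition, same cost class).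

-- ===== PORT A =====
-- reversed(records) loop with break, as structural recursion on records.reverse
def goA : List (List (List (String × Bool))) → Int → Int
  | [], count => count
  | r :: rs, count =>
    match PySem.List.pyGet? r 4 with       -- r[4]; none = IndexError (A raises, outside Pre_)
    | none => count
    | some d =>
      if (d.lookup "is_home").getD false   -- dict.get("is_home", False): first-match lookup
      then goA rs (count + 1)
      else count

def consecutive_home_py (records : List (List (List (String × Bool)))) : Int :=
  goA records.reverse 0

-- ===== PORT B =====
def consecutive_home_py_alt (records : List (List (List (String × Bool)))) : Int :=
  records.foldl (fun count r =>
    match PySem.List.pyGet? r 4 with   -- r[4]; none = IndexError (B raises, outside Pre_)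
    | none => 0
    | some d => if (d.lookup "is_home").getD false then count + 1 else 0) 0

-- ===== PRECONDITION & SPEC =====
-- Pre_ restricts to well-formed inputs (every record carries at least 5 fields, the shape the
-- caller always passes); A only inspects the trailing records, so on malformed inputs it raises
-- IndexError or returns early, while B's forward pass raises IndexError on any short record.
def Pre_consecutive_home_py (records : List (List (List (String × Bool)))) : Prop :=
  ((records.all fun r => decide (4 < r.length)) = true)
instance (records : List (List (List (String × Bool)))) : Decidable (Pre_consecutive_home_py records) := by unfold Pre_consecutive_home_py; infer_instance

def pvWitness_consecutive_home_py : (List (List (List (String × Bool)))) :=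
  [[[], [], [], [], [("is_home", true)]]]

def Spec_consecutive_home_py (records : List (List (List (String × Bool)))) (out : Int) : Prop := out = consecutive_home_py_alt records
instance (records : List (List (List (String × Bool)))) (out : Int) : Decidable (Spec_consecutive_home_py records out) := by unfold Spec_consecutive_home_py; infer_instance

-- ===== CLAIM (what is proved, stated in full; the proofs are below) =====
def Claim_equal_consecutive_home_py : Prop := ∀ (records : List (List (List (String × Bool)))), Dom_consecutive_home_py records → Pre_consecutive_home_py records → Spec_consecutive_home_py records (consecutive_home_py records)


-- ===== LEMMAS AND PROOFS =====

-- the loop-body condition 'r[4].get("is_home", False)' shared by both sides' reasoning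
def homeRec (r : List (List (String × Bool))) : Bool :=
  decide (4 < r.length) && (((r.getD 4 []).lookup "is_home").getD false)

theorem takeWhile_append_of_all {α : Type} (p : α → Bool) (u v : List α)
    (h : u.all p = true) : (u ++ v).takeWhile p = u ++ v.takeWhile p := by
  induction u with
  | nil => simp
  | cons x u ih =>
    simp only [List.all_cons, Bool.and_eq_true] at h
    simp [h.1, ih h.2]

theorem takeWhile_append_of_not_all {α : Type} (p : α → Bool) (u v : List α)
    (h : u.all p = false) : (u ++ v).takeWhile p = u.takeWhile p := by
  induction u with
  | nil => simp at h
  | cons x u ih =>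
    by_cases hx : p x = true
    · simp only [List.all_cons, hx, Bool.true_and] at h
      simp [hx, ih h]
    · simp only [Bool.not_eq_true] at hx
      simp [hx]

-- A's reverse scan computes the length of the home-prefix of the reversed list.
theorem goA_eq (l : List (List (List (String × Bool)))) (c : Int)
    (h : ((l.dropWhile homeRec).head?.all fun r => decide (4 < r.length)) = true) :
    goA l c = c + ((l.takeWhile homeRec).length : Int) := by
  induction l generalizing c with
  | nil => simp [goA]
  | cons r rs ih =>
    by_cases hlen : 4 < r.length
    · have hget : PySem.List.pyGet? r 4 = some (r.getD 4 []) := by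
        simp [PySem.List.pyGet?, PySem.List.pyIdx?, List.getD, hlen]
      have e : goA (r :: rs) c =
          if ((r.getD 4 []).lookup "is_home").getD false then goA rs (c + 1) else c := by
        simp only [goA, hget]
      by_cases hh : ((r.getD 4 []).lookup "is_home").getD false = true
      · have hr : homeRec r = true := by unfold homeRec; rw [hh]; simp [hlen]
        rw [List.dropWhile_cons_of_pos hr] at h
        rw [e, if_pos hh, List.takeWhile_cons_of_pos hr, ih (c + 1) h]
        simp only [List.length_cons]
        push_cast; ring
      · have hh' : ((r.getD 4 []).lookup "is_home").getD false = false := by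
          simpa using hh
        have hr : homeRec r = false := by unfold homeRec; rw [hh']; simp
        rw [e, if_neg hh, List.takeWhile_cons_of_neg (by simp [hr])]
        simp
    · -- r[4] would raise IndexError; the hypothesis excludes this case
      have hr : homeRec r = false := by simp [homeRec, hlen]
      rw [List.dropWhile_cons_of_neg (by simp [hr])] at h
      simp [hlen] at h

-- B's forward reset pass: total characterisation of the fold.
theorem foldB_eq (l : List (List (List (String × Bool)))) (c : Int) :
    l.foldl (fun count r => if homeRec r then count + 1 else 0) c =
      if l.all homeRec then c + (l.length : Int)
      else ((l.reverse.takeWhile homeRec).length : Int) := by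
  induction l generalizing c with
  | nil => simp
  | cons r rs ih =>
    rw [List.foldl_cons]
    by_cases hr : homeRec r = true
    · rw [if_pos hr, ih (c + 1)]
      by_cases hall : rs.all homeRec = true
      · simp [hall, hr]; ring
      · have h2 : (r :: rs).all homeRec = false := by simp [hall]
        rw [if_neg (by simp [hall]), h2, if_neg (by simp), List.reverse_cons,
          takeWhile_append_of_not_all homeRec _ _ (by simp [hall])]
    · have hr' : homeRec r = false := by simpa using hr
      rw [if_neg hr, ih 0, List.reverse_cons]
      by_cases hall : rs.all homeRec = true
      · rw [if_pos hall,
          takeWhile_append_of_all homeRec _ _ (by rw [List.all_reverse]; exact hall)]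
        simp [hr']
      · have hA : rs.reverse.all homeRec = false := by
          rw [List.all_reverse]; simpa using hall
        rw [if_neg hall, takeWhile_append_of_not_all homeRec _ _ hA]
        simp [hr']

-- ===== VERDICT (by name: the statement is the Claim_ definition above) =====
theorem consecutive_home_py_spec : Claim_equal_consecutive_home_py := by
  intro records _ hpre
  unfold Pre_consecutive_home_py at hpre
  have hstep : (fun (count : Int) (r : List (List (String × Bool))) =>
      match PySem.List.pyGet? r 4 with
      | none => 0
      | some d => if (d.lookup "is_home").getD false then count + 1 else 0) =
      fun count r => if homeRec r then count + 1 else 0 := by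
    funext count r
    by_cases hlen : 4 < r.length
    · have hget : PySem.List.pyGet? r 4 = some (r.getD 4 []) := by
        simp [PySem.List.pyGet?, PySem.List.pyIdx?, List.getD, hlen]
      rw [hget]
      cases hb : ((r.getD 4 []).lookup "is_home").getD false with
      | false =>
        have hr : homeRec r = false := by unfold homeRec; rw [hb]; simp
        simp only [List.getD] at hb
        simp [hr, hb]
      | true =>
        have hr : homeRec r = true := by unfold homeRec; rw [hb]; simp [hlen]
        simp only [List.getD] at hb
        simp [hr, hb]
    · have hget : PySem.List.pyGet? r 4 = none := by
        simp [PySem.List.pyGet?, PySem.List.pyIdx?, hlen]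
      have hr : homeRec r = false := by simp [homeRec, hlen]
      simp [hget, hr]
  have hpre' : ((records.reverse.dropWhile homeRec).head?.all
      fun r => decide (4 < r.length)) = true := by
    cases hh : (records.reverse.dropWhile homeRec).head? with
    | none => simp
    | some r =>
      have hm : r ∈ records.reverse.dropWhile homeRec := List.mem_of_mem_head? (by simp [hh])
      have : r ∈ records := List.mem_reverse.mp ((List.dropWhile_sublist _).subset hm)
      simpa using List.all_eq_true.mp hpre r this
  unfold Spec_consecutive_home_py consecutive_home_py consecutive_home_py_alt
  rw [hstep, goA_eq _ _ hpre', foldB_eq]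
  by_cases hall : records.all homeRec = true
  · have : records.reverse.takeWhile homeRec = records.reverse := by
      rw [List.takeWhile_eq_self_iff]
      intro a ha; exact List.all_eq_true.mp hall a (List.mem_reverse.mp ha)
    simp [hall, this]
  · have : records.reverse.all homeRec = false := by simpa using hall
    simp [hall]
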